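-- pv_equiv track=rewrite | github.com/danielcmessias/AOC2022 | 03.py | part1
-- ===== SOURCE A (Python) =====
-- from typing import List
--
-- def score_char(char: str) -> int:
--     if char.isupper():
--         return ord(char) - ord("A") + 27
--     else:
--         return ord(char) - ord("a") + 1
--
-- def part1(lines: List[str]) -> int:
--     total_score = 0
--     for line in lines:
--         chars = list(line)
--         r1 = set(chars[: len(chars) // 2])
--         r2 = set(chars[len(chars) // 2 :])
--         total_score += score_char(min(r1.intersection(r2)))
--     return total_score
-- ===== SOURCE B (Python) =====
-- def first_common(xs, ys):
--     # xs, ys ascending; returns the smallest element present in both, or None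
--     while xs and ys:
--         if xs[0] == ys[0]:
--             return xs[0]
--         if xs[0] < ys[0]:
--             xs = xs[1:]
--         else:
--             ys = ys[1:]
--     return None
--
-- def part1(lines):
--     total = 0
--     for line in lines:
--         h = len(line) // 2
--         c = first_common(sorted(line[:h]), sorted(line[h:]))
--         o = ord(c)
--         total += o - 38 if c.isupper() else o - 96
--     return total
-- ===== Notes on version B (the rewrite author's own statement) =====
-- stated objective: alternative
-- what changed: B replaces A's per-line set construction, set intersection and min() by sorting the two halves and running a two-pointer merge over the sorted lists that stops at the first (hence smallest) element common to both, scored arithmetically.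
import Mathlib
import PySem

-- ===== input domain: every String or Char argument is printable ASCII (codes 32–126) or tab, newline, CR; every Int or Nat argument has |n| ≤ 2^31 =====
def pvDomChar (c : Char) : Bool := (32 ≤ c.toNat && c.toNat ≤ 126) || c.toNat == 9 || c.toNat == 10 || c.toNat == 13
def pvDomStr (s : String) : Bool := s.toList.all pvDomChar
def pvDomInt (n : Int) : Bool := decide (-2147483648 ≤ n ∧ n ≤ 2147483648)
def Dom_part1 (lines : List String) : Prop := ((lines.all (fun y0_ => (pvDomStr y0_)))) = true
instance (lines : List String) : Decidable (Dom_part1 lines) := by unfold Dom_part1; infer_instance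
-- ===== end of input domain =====

-- B replaces A's per-line set building + set intersection + min() by sorting the two halves
-- and running a two-pointer merge that finds the smallest common element (alternative algorithm).

-- ===== PORT A =====
-- char.isupper() ported as the ASCII uppercase test; exact on Dom_part1 (printable ASCII + tab/newline/CR)
def score_char (char : Char) : Int :=
  if 65 ≤ char.toNat ∧ char.toNat ≤ 90 then
    (char.toNat : Int) - 65 + 27
  else
    (char.toNat : Int) - 97 + 1

-- the loop body of A (one line of input)
def stepA (total_score : Int) (line : String) : Int :=
  let chars := line.toList
  let r1 : PySem.Set Char :=
    PySem.Set.ofList (PySem.List.slice chars none (some (PySem.Int.floordiv (chars.length : Int) 2)))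
  let r2 : PySem.Set Char :=
    PySem.Set.ofList (PySem.List.slice chars (some (PySem.Int.floordiv (chars.length : Int) 2)) none)
  match PySem.List.min? (PySem.Set.inter r1 r2) (fun c => c) with
  | some c => total_score + score_char c
  | none => total_score   -- Python's min raises ValueError here; excluded by Pre_part1

def part1 (lines : List String) : Int :=
  lines.foldl stepA 0

-- ===== PORT B =====
-- first_common: two-pointer merge of two ascending lists; smallest element present in both
def firstCommon : List Char → List Char → Option Char
  | x :: xs, y :: ys =>
    if x = y then some x
    else if x < y then firstCommon xs (y :: ys)
    else firstCommon (x :: xs) ys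
  | _, _ => none

-- the loop body of B (one line of input)
def stepB (total : Int) (line : String) : Int :=
  let chars := line.toList
  let h := PySem.Int.floordiv (chars.length : Int) 2
  match firstCommon
      (PySem.List.sorted (PySem.List.slice chars none (some h)) (fun c => c) false)
      (PySem.List.sorted (PySem.List.slice chars (some h) none) (fun c => c) false) with
  | some c =>
    total + (if 65 ≤ c.toNat ∧ c.toNat ≤ 90 then (c.toNat : Int) - 38 else (c.toNat : Int) - 96)
  | none => total   -- Python's ord(None) raises TypeError here; excluded by Pre_part1

def part1_alt (lines : List String) : Int :=
  lines.foldl stepB 0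

-- ===== PRECONDITION & SPEC =====
-- Pre_ excludes exactly the inputs where A raises ValueError (min of an empty set):
-- lines whose two halves share no character (in particular empty lines).
def Pre_part1 (lines : List String) : Prop :=
  ∀ line ∈ lines,
    ((line.toList.take (line.toList.length / 2)).any
      (fun c => (line.toList.drop (line.toList.length / 2)).contains c)) = true
instance (lines : List String) : Decidable (Pre_part1 lines) := by unfold Pre_part1; infer_instance

def pvWitness_part1 : List String := ["abca", "xx"]

def Spec_part1 (lines : List String) (out : Int) : Prop := out = part1_alt lines
instance (lines : List String) (out : Int) : Decidable (Spec_part1 lines out) := by unfold Spec_part1; infer_instance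

-- ===== CLAIM (what is proved, stated in full; the proofs are below) =====
def Claim_equal_part1 : Prop := ∀ (lines : List String), Dom_part1 lines → Pre_part1 lines → Spec_part1 lines (part1 lines)

-- ===== LEMMAS AND PROOFS =====

-- specification of the two-pointer merge on sorted lists
theorem firstCommon_spec (a b : List Char) (ha : a.Pairwise (· ≤ ·)) (hb : b.Pairwise (· ≤ ·)) :
    (∀ m, firstCommon a b = some m → m ∈ a ∧ m ∈ b ∧ ∀ d ∈ a, d ∈ b → m ≤ d) ∧
    (firstCommon a b = none → ∀ d ∈ a, d ∉ b) := by
  fun_induction firstCommon a b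
  case case1 xs x ys =>
    refine ⟨?_, by simp⟩
    rintro m hm
    injection hm with hm; subst hm
    refine ⟨List.mem_cons_self, List.mem_cons_self, ?_⟩
    intro d hd _
    rcases List.mem_cons.mp hd with h | h
    · exact h ▸ le_refl _
    · exact List.rel_of_pairwise_cons ha h
  case case2 x xs y ys hne hlt ih =>
    have hx : x ∉ y :: ys := by
      intro hmem
      have : y ≤ x := by
        rcases List.mem_cons.mp hmem with h | h
        · exact h ▸ le_refl _
        · exact List.rel_of_pairwise_cons hb h
      exact absurd hlt (not_lt.mpr this)
    have ih' := ih (List.Pairwise.sublist (List.sublist_cons_self x xs) ha) hb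
    constructor
    · intro m hm
      obtain ⟨h1, h2, h3⟩ := ih'.1 m hm
      refine ⟨List.mem_cons_of_mem _ h1, h2, ?_⟩
      intro d hd hdb
      rcases List.mem_cons.mp hd with h | h
      · exact absurd (h ▸ hdb) hx
      · exact h3 d h hdb
    · intro hn d hd hdb
      rcases List.mem_cons.mp hd with h | h
      · exact hx (h ▸ hdb)
      · exact ih'.2 hn d h hdb
  case case3 x xs y ys hne hge ih =>
    have hy : y ∉ x :: xs := by
      intro hmem
      have hxy : x ≤ y := by
        rcases List.mem_cons.mp hmem with h | h
        · exact h ▸ le_refl _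
        · exact List.rel_of_pairwise_cons ha h
      exact hne (le_antisymm hxy (not_lt.mp hge))
    have ih' := ih ha (List.Pairwise.sublist (List.sublist_cons_self y ys) hb)
    constructor
    · intro m hm
      obtain ⟨h1, h2, h3⟩ := ih'.1 m hm
      refine ⟨h1, List.mem_cons_of_mem _ h2, ?_⟩
      intro d hd hdb
      rcases List.mem_cons.mp hdb with h | h
      · exact absurd (h ▸ hd) hy
      · exact h3 d hd h
    · intro hn d hd hdb
      rcases List.mem_cons.mp hdb with h | h
      · exact hy (h ▸ hd)
      · exact ih'.2 hn d hd h
  case case4 a' b' hnc =>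
    constructor
    · intro m hm
      cases hm
    · intro _ d hd hdb
      match a', b' with
      | x :: xs, y :: ys => exact hnc x xs y ys rfl rfl
      | [], _ => cases hd
      | _ :: _, [] => cases hdb

theorem step_eq (line : String)
    (hpre : ((line.toList.take (line.toList.length / 2)).any
      (fun c => (line.toList.drop (line.toList.length / 2)).contains c)) = true)
    (total : Int) : stepA total line = stepB total line := by
  unfold stepA stepB
  have hfd : PySem.Int.floordiv ((line.toList.length : Nat) : Int) 2
      = ((line.toList.length / 2 : Nat) : Int) := by
    exact_mod_cast PySem.Int.floordiv_natCast line.toList.length 2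
  have hsl1 : PySem.List.slice line.toList none (some (PySem.Int.floordiv (line.toList.length : Int) 2))
      = line.toList.take (line.toList.length / 2) := by
    rw [hfd, PySem.List.slice_to _ (by positivity), Int.toNat_natCast]
  have hsl2 : PySem.List.slice line.toList (some (PySem.Int.floordiv (line.toList.length : Int) 2)) none
      = line.toList.drop (line.toList.length / 2) := by
    rw [hfd, PySem.List.slice_from _ (by positivity), Int.toNat_natCast]
  simp only [hsl1, hsl2]
  set L := line.toList.take (line.toList.length / 2) with hL
  set R := line.toList.drop (line.toList.length / 2) with hR
  rw [List.any_eq_true] at hpre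
  obtain ⟨c0, hc0L, hc0R⟩ := hpre
  rw [List.contains_iff_mem] at hc0R
  -- A's minimum exists
  have hc0S : c0 ∈ PySem.Set.inter (PySem.Set.ofList L) (PySem.Set.ofList R) := by
    rw [PySem.Set.mem_inter]
    exact ⟨(PySem.Set.mem_ofList _ _).mpr hc0L, (PySem.Set.mem_ofList _ _).mpr hc0R⟩
  -- B's sorted halves
  have hpL : (PySem.List.sorted L (fun c => c) false).Pairwise (· ≤ ·) := by
    simpa using PySem.List.sorted_pairwise L (fun c => c)
  have hpR : (PySem.List.sorted R (fun c => c) false).Pairwise (· ≤ ·) := by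
    simpa using PySem.List.sorted_pairwise R (fun c => c)
  have hfc := firstCommon_spec _ _ hpL hpR
  cases hminA : PySem.List.min? (PySem.Set.inter (PySem.Set.ofList L) (PySem.Set.ofList R)) (fun c => c) with
  | none =>
    rw [PySem.List.min?_eq_none_iff] at hminA
    exact absurd (hminA ▸ hc0S) (List.not_mem_nil)
  | some c =>
  have hcS := PySem.List.min?_mem hminA
  rw [PySem.Set.mem_inter] at hcS
  have hcL : c ∈ L := (PySem.Set.mem_ofList _ _).mp hcS.1
  have hcR : c ∈ R := (PySem.Set.mem_ofList _ _).mp hcS.2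
  have hcmin := PySem.List.min?_isMin hminA
  cases hminB : firstCommon (PySem.List.sorted L (fun c => c) false) (PySem.List.sorted R (fun c => c) false) with
  | none =>
    exact absurd ((PySem.List.mem_sorted _ _ _ _).mpr hc0R)
      (hfc.2 hminB c0 ((PySem.List.mem_sorted _ _ _ _).mpr hc0L))
  | some m =>
  obtain ⟨hm1, hm2, hm3⟩ := hfc.1 m hminB
  have hmL : m ∈ L := (PySem.List.mem_sorted _ _ _ _).mp hm1
  have hmR : m ∈ R := (PySem.List.mem_sorted _ _ _ _).mp hm2
  have hmc : m = c := by
    refine le_antisymm ?_ ?_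
    · exact hm3 c ((PySem.List.mem_sorted _ _ _ _).mpr hcL) ((PySem.List.mem_sorted _ _ _ _).mpr hcR)
    · have : m ∈ PySem.Set.inter (PySem.Set.ofList L) (PySem.Set.ofList R) := by
        rw [PySem.Set.mem_inter]
        exact ⟨(PySem.Set.mem_ofList _ _).mpr hmL, (PySem.Set.mem_ofList _ _).mpr hmR⟩
      exact hcmin m this
  subst hmc
  simp only [score_char]
  split_ifs <;> omega

-- ===== VERDICT (by name: the statement is the Claim_ definition above) =====
theorem part1_spec : Claim_equal_part1 := by
  intro lines hdom hpre
  unfold Spec_part1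
  unfold part1 part1_alt
  refine PySem.List.foldl_congr_mem _ _ _ _ ?_
  intro acc line hmem
  exact step_eq line (hpre line hmem) acc
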